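-- pv_equiv track=rewrite | github.com/rap-lab-org/public_pymcpf-d | libmcpfd/common.py | analyzeConflicts
-- ===== SOURCE A (Python) =====
-- import copy
--
-- def analyzeConflicts(conflict_set):
--   sm_conflict = list()
--   conflicts = copy.deepcopy(conflict_set)
--   for conflict in conflict_set:
--     num = conflicts.count(conflict)
--     while(conflicts.count(conflict)>0):
--       conflicts.remove(conflict)
--     if(num > 1): sm_conflict.append({'conflict':conflict, 'num': num})
--   return sm_conflict
-- ===== SOURCE B (Python) =====
-- def analyzeConflicts(conflict_set):
--   seen = []
--   for c in conflict_set: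
--     if c not in seen:
--       seen.append(c)
--   sm_conflict = []
--   for c in seen:
--     num = conflict_set.count(c)
--     if num > 1:
--       sm_conflict.append({'conflict': c, 'num': num})
--   return sm_conflict
-- ===== Notes on version B (the rewrite author's own statement) =====
-- stated objective: simpler
-- what changed: Replaces A's destructive drain (deepcopy + while-count/remove loop that empties a working copy) with a non-mutating first-occurrence dedup pass followed by a counting pass over the original list.
import Mathlib
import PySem

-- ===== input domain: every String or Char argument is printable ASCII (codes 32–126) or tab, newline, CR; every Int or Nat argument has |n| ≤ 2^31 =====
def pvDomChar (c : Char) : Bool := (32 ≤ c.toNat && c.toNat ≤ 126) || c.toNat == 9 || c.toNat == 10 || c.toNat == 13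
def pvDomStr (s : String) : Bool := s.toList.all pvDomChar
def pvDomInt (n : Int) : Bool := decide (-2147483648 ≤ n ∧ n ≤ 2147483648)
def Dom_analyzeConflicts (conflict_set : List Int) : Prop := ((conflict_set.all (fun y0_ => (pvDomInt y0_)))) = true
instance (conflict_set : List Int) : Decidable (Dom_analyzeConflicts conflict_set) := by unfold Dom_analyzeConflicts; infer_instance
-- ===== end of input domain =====

-- B replaces A's destructive drain (deepcopy + while-count/remove emptying a working copy)
-- with a non-mutating first-occurrence dedup pass followed by a counting pass (objective: simpler).

-- ===== PORT A =====

-- 'while conflicts.count(conflict) > 0: conflicts.remove(conflict)'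
def drainLoop (xs : List Int) (v : Int) : List Int :=
  if h : 0 < PySem.List.count xs v then
    drainLoop ((PySem.List.remove? xs v).getD xs) v
  else xs
termination_by xs.length
decreasing_by
  have hm : v ∈ xs := by
    by_contra hv
    simp [PySem.List.count_eq, List.count_eq_zero_of_not_mem hv] at h
  have he := PySem.List.remove?_eq_some_erase xs v hm
  rw [he]
  simp only [Option.getD_some]
  rw [List.length_erase_of_mem hm]
  have := List.length_pos_of_mem hm
  omega

def analyzeConflicts (conflict_set : List Int) : List (List (String × Int)) :=
  -- sm_conflict = []; conflicts = deepcopy(conflict_set); then the for-loop over conflict_set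
  (conflict_set.foldl
    (fun (st : List Int × List (List (String × Int))) conflict =>
      let num : Int := PySem.List.count st.1 conflict
      let conflicts := drainLoop st.1 conflict
      let sm := if num > 1 then st.2 ++ [[("conflict", conflict), ("num", num)]] else st.2
      (conflicts, sm))
    (conflict_set, [])).2

-- ===== PORT B =====
def analyzeConflicts_alt (conflict_set : List Int) : List (List (String × Int)) :=
  -- pass 1: distinct elements in first-occurrence order
  let seen := conflict_set.foldl (fun s c => if c ∈ s then s else s ++ [c]) []
  -- pass 2: count each distinct element in the original list
  seen.foldl
    (fun sm c =>
      let num : Int := PySem.List.count conflict_set c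
      if num > 1 then sm ++ [[("conflict", c), ("num", num)]] else sm)
    []

-- ===== PRECONDITION & SPEC =====
def Spec_analyzeConflicts (conflict_set : List Int) (out : List (List (String × Int))) : Prop := out = analyzeConflicts_alt conflict_set
instance (conflict_set : List Int) (out : List (List (String × Int))) : Decidable (Spec_analyzeConflicts conflict_set out) := by unfold Spec_analyzeConflicts; infer_instance

-- ===== CLAIM (what is proved, stated in full; the proofs are below) =====
def Claim_equal_analyzeConflicts : Prop := ∀ (conflict_set : List Int), Dom_analyzeConflicts conflict_set → Spec_analyzeConflicts conflict_set (analyzeConflicts conflict_set)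

-- ===== LEMMAS AND PROOFS =====

-- ===== VERDICT (by name: the statement is the Claim_ definition above) =====
-- drainLoop removes every occurrence: it is filter (· ≠ v)
theorem drainLoop_eq_filter (xs : List Int) (v : Int) :
    drainLoop xs v = xs.filter (· ≠ v) := by
  fun_induction drainLoop xs v with
  | case1 xs h ih =>
    have hm : v ∈ xs := by
      by_contra hv
      simp [PySem.List.count_eq, List.count_eq_zero_of_not_mem hv] at h
    have he := PySem.List.remove?_eq_some_erase xs v hm
    simp only [he, Option.getD_some] at ih ⊢
    rw [ih]
    -- filtering after erasing one v = filtering directly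
    obtain ⟨l1, l2, hv1, hxs, hxe⟩ := List.exists_erase_eq hm
    rw [hxe, hxs]
    simp [List.filter_append]
  | case2 xs h =>
    have hv : v ∉ xs := by
      by_contra hv
      exact h (by simp [PySem.List.count_eq, List.count_pos_iff.mpr hv])
    symm
    rw [List.filter_eq_self]
    intro a ha
    simp only [ne_eq, decide_eq_true_eq]
    rintro rfl; exact hv ha

-- proof-only helpers: the two loop bodies, and a fused one-pass form both programs reduce to
def stepA (st : List Int × List (List (String × Int))) (conflict : Int) :
    List Int × List (List (String × Int)) :=
  let num : Int := PySem.List.count st.1 conflict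
  let conflicts := drainLoop st.1 conflict
  let sm := if num > 1 then st.2 ++ [[("conflict", conflict), ("num", num)]] else st.2
  (conflicts, sm)

def dedupStep (s : List Int) (c : Int) : List Int := if c ∈ s then s else s ++ [c]

def stepB (cs : List Int) (sm : List (List (String × Int))) (c : Int) :
    List (List (String × Int)) :=
  let num : Int := PySem.List.count cs c
  if num > 1 then sm ++ [[("conflict", c), ("num", num)]] else sm

def fusedStep (cs : List Int) (p : List Int × List (List (String × Int))) (c : Int) :
    List Int × List (List (String × Int)) :=
  if c ∈ p.1 then p else (p.1 ++ [c], stepB cs p.2 c)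

theorem count_filter_not_mem (cs s : List Int) (c : Int) (hc : c ∉ s) :
    PySem.List.count (cs.filter (fun x => decide (x ∉ s))) c = PySem.List.count cs c := by
  simp only [PySem.List.count_eq]
  rw [List.count_filter (by simpa using hc)]

theorem filter_not_mem_append (cs s : List Int) (c : Int) :
    (cs.filter (fun x => decide (x ∉ s))).filter (fun x => decide (x ≠ c))
      = cs.filter (fun x => decide (x ∉ s ++ [c])) := by
  rw [List.filter_filter]
  apply List.filter_congr
  intro x _
  simp [and_comm]

theorem foldA_eq (cs : List Int) :
    ∀ (t s : List Int) (sm : List (List (String × Int))), (∀ c ∈ t, c ∈ cs) →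
    (t.foldl stepA (cs.filter (fun x => decide (x ∉ s)), sm)).2
      = (t.foldl (fusedStep cs) (s, sm)).2 := by
  intro t
  induction t with
  | nil => intro s sm _; rfl
  | cons c t ih =>
    intro s sm hmem
    simp only [List.foldl_cons]
    by_cases hc : c ∈ s
    · have hnum : PySem.List.count (cs.filter (fun x => decide (x ∉ s))) c = 0 := by
        simp only [PySem.List.count_eq]
        rw [List.count_eq_zero_of_not_mem]
        simp only [List.mem_filter, decide_eq_true_eq]
        rintro ⟨-, hns⟩; exact hns hc
      have hdrain : drainLoop (cs.filter (fun x => decide (x ∉ s))) c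
          = cs.filter (fun x => decide (x ∉ s)) := by
        rw [drainLoop_eq_filter, List.filter_eq_self]
        intro a ha
        simp only [List.mem_filter, decide_eq_true_eq] at ha
        simp only [ne_eq, decide_eq_true_eq]
        rintro rfl; exact ha.2 hc
      have hA : stepA (cs.filter (fun x => decide (x ∉ s)), sm) c
          = (cs.filter (fun x => decide (x ∉ s)), sm) := by
        simp only [stepA]
        rw [hnum, hdrain]
        norm_num
      have hF : fusedStep cs (s, sm) c = (s, sm) := by simp [fusedStep, hc]
      rw [hA, hF]
      exact ih s sm (fun x hx => hmem x (List.mem_cons_of_mem _ hx))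
    · have hnum : PySem.List.count (cs.filter (fun x => decide (x ∉ s))) c
          = PySem.List.count cs c := count_filter_not_mem cs s c hc
      have hA : stepA (cs.filter (fun x => decide (x ∉ s)), sm) c
          = (cs.filter (fun x => decide (x ∉ s ++ [c])), stepB cs sm c) := by
        simp only [stepA, stepB]
        rw [hnum, drainLoop_eq_filter, filter_not_mem_append]
      have hF : fusedStep cs (s, sm) c = (s ++ [c], stepB cs sm c) := by
        simp [fusedStep, hc]
      rw [hA, hF]
      exact ih (s ++ [c]) (stepB cs sm c) (fun x hx => hmem x (List.mem_cons_of_mem _ hx))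

theorem foldB_eq (cs : List Int) :
    ∀ (t s : List Int) (init : List (List (String × Int))),
    (t.foldl dedupStep s).foldl (stepB cs) init
      = (t.foldl (fusedStep cs) (s, s.foldl (stepB cs) init)).2 := by
  intro t
  induction t with
  | nil => intro s init; rfl
  | cons c t ih =>
    intro s init
    simp only [List.foldl_cons]
    by_cases hc : c ∈ s
    · rw [show dedupStep s c = s by simp [dedupStep, hc],
        show fusedStep cs (s, s.foldl (stepB cs) init) c = (s, s.foldl (stepB cs) init) by
          simp [fusedStep, hc]]
      exact ih s init
    · rw [show dedupStep s c = s ++ [c] by simp [dedupStep, hc],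
        show fusedStep cs (s, s.foldl (stepB cs) init) c
            = (s ++ [c], stepB cs (s.foldl (stepB cs) init) c) by simp [fusedStep, hc]]
      rw [ih (s ++ [c]) init, List.foldl_append]
      simp only [List.foldl_cons, List.foldl_nil]

theorem analyzeConflicts_eq_foldA (cs : List Int) :
    analyzeConflicts cs = (cs.foldl stepA (cs, [])).2 := rfl

theorem analyzeConflicts_alt_eq_foldB (cs : List Int) :
    analyzeConflicts_alt cs = (cs.foldl dedupStep []).foldl (stepB cs) [] := rfl

theorem analyzeConflicts_spec : Claim_equal_analyzeConflicts := by
  intro cs _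
  unfold Spec_analyzeConflicts
  rw [analyzeConflicts_eq_foldA, analyzeConflicts_alt_eq_foldB, foldB_eq]
  have h0 : cs.filter (fun x => decide (x ∉ ([] : List Int))) = cs := by
    simp
  have hA := foldA_eq cs cs [] [] (fun c hc => hc)
  rw [h0] at hA
  exact hA
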